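-- pv_equiv track=rewrite | github.com/sohyunwriter/algorithm | basic/구현/points_to_star.py | points_to_star
-- ===== SOURCE A (Python) =====
-- def points_to_star(points):
--     """
--     This function is to mark points(x, y) to star(*) in the board.
--     Input: [(x1, y1), (x2, y2), .... ] 좌표들의 집합
--
--     Output: 좌표는 (*)로 출력하고 아닐 경우 (.)로 출력
--             단, board 크기는 (*)의 최소, 최대에 따라 이쁘게 출력. (e.g. ["...", "*.."] (<-wrong),  ["*.."] (<-correct)
--
--     Examples:
--     >>> points_to_star([(-1, 0), (1, 0)])
--     ['*.*']
--
--     >>> points_to_star([(0, 0)])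
--     ['*']
--
--     >>> points_to_star([(-2, 3), (5, 4)])
--     ['.......*', '*.......']
--     """
--
--     min_x = min(points, key=lambda x: x[0])[0]
--     max_x = max(points, key=lambda x: x[0])[0]
--     min_y = min(points, key=lambda x: x[1])[1]
--     max_y = max(points, key=lambda x: x[1])[1]
--     board = [["."] * (max_x - min_x + 1) for _ in range(min_y, max_y+1)]
--
--     # parallel translation (min_x, max_y) -> (0, 0)
--     # y means row, x means col
--     for x, y in points:
--         board[abs(y-max_y)][x-min_x] = "*"
--
--     ans = ["".join(i) for i in board]
--     return ans
-- ===== SOURCE B (Python) =====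
-- def points_to_star(points):
--     xs = [p[0] for p in points]
--     ys = [p[1] for p in points]
--     min_x, max_x = min(xs), max(xs)
--     min_y, max_y = min(ys), max(ys)
--     width = max_x - min_x + 1
--     rows = {}
--     for x, y in points:
--         rows.setdefault(max_y - y, set()).add(x - min_x)
--     out = []
--     for r in range(max_y - min_y + 1):
--         parts = []
--         prev = 0
--         for c in sorted(rows.get(r, ())):
--             parts.append('.' * (c - prev))
--             parts.append('*')
--             prev = c + 1
--         parts.append('.' * (width - prev))
--         out.append(''.join(parts))
--     return out
-- ===== Notes on version B (the rewrite author's own statement) =====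
-- stated objective: faster
-- what changed: B replaces A's mutable 2D board (scatter a star per point, then join each row of one-char strings) by a dict grouping each point's row to a set of its columns, and emits every row string directly by concatenating C-level '.'-runs between the sorted star columns, so no per-cell Python-level work remains.
import Mathlib
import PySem

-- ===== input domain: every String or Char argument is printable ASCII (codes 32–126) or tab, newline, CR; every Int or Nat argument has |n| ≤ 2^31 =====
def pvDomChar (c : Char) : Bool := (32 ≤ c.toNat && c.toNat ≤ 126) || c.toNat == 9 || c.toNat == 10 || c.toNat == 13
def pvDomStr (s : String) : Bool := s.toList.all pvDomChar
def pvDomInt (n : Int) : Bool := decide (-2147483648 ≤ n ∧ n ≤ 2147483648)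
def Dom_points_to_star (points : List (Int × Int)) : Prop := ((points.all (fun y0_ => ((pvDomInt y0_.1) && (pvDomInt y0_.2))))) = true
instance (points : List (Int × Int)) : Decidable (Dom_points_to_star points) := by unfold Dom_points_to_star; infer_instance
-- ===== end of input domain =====

-- B replaces A's mutable 2D board (scatter one star per point, join each row of one-char
-- strings) by a dict grouping each row to the set of its star columns and emitting every
-- row string as concatenated '.'-runs between the sorted star columns (objective: faster).


-- ===== PORT A =====
-- Python's 'row[j] = v' on a list: negative index counts from the end; an out-of-range
-- index (IndexError in Python) cannot occur in this port, every written index is in range.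
def pySetRow (row : List String) (j : Int) (v : String) : List String :=
  let j' := if j < 0 then j + row.length else j
  row.set j'.toNat v

-- Python's 'board[i][j] = v' on a list of lists (same remark on ranges).
def pySetCell (b : List (List String)) (i j : Int) (v : String) : List (List String) :=
  let i' := if i < 0 then i + b.length else i
  b.modify i'.toNat (fun row => pySetRow row j v)

def points_to_star (points : List (Int × Int)) : List String :=
  -- min()/max() of an empty list raise ValueError in Python: excluded by Pre_;
  -- the .getD default is never read on admitted inputs.
  let min_x := ((PySem.List.min? points (fun x => x.1)).getD (0, 0)).1
  let max_x := ((PySem.List.max? points (fun x => x.1)).getD (0, 0)).1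
  let min_y := ((PySem.List.min? points (fun x => x.2)).getD (0, 0)).2
  let max_y := ((PySem.List.max? points (fun x => x.2)).getD (0, 0)).2
  let board : List (List String) :=
    (PySem.List.pyRange min_y (max_y + 1) 1).map
      (fun _ => List.replicate (max_x - min_x + 1).toNat ".")
  let board := points.foldl (fun bd p => pySetCell bd |p.2 - max_y| (p.1 - min_x) "*") board
  board.map (fun row => PySem.Str.join "" row)

-- ===== PORT B =====
-- Python's  '.' * k  (a non-positive k gives ''): exact
def dots (k : Int) : String := String.ofList (List.replicate k.toNat '.')

def points_to_star_alt (points : List (Int × Int)) : List String :=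
  let xs := points.map (fun p => p.1)
  let ys := points.map (fun p => p.2)
  let min_x := (PySem.List.min? xs (fun v => v)).getD 0
  let max_x := (PySem.List.max? xs (fun v => v)).getD 0
  let min_y := (PySem.List.min? ys (fun v => v)).getD 0
  let max_y := (PySem.List.max? ys (fun v => v)).getD 0
  let width := max_x - min_x + 1
  -- rows.setdefault(max_y - y, set()).add(x - min_x)
  let rows : PySem.Dict Int (PySem.Set Int) :=
    points.foldl (fun d p =>
      PySem.Dict.modify d (max_y - p.2) PySem.Set.empty
        (fun s => PySem.Set.add s (p.1 - min_x))) PySem.Dict.empty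
  (PySem.List.pyRange 0 (max_y - min_y + 1) 1).map (fun r =>
    let st := (PySem.List.sorted (rows.getD r PySem.Set.empty) (fun v => v) false).foldl
      (fun (st : List String × Int) c => (st.1 ++ [dots (c - st.2), "*"], c + 1)) ([], 0)
    PySem.Str.join "" (st.1 ++ [dots (width - st.2)]))

-- ===== PRECONDITION & SPEC =====
-- Pre_ excludes only the empty list, on which Python's min() raises ValueError (in A and in B alike).
def Pre_points_to_star (points : List (Int × Int)) : Prop := points ≠ []
instance (points : List (Int × Int)) : Decidable (Pre_points_to_star points) := by unfold Pre_points_to_star; infer_instance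
def pvWitness_points_to_star : (List (Int × Int)) := [((-1 : Int), (0 : Int)), (1, 0)]

def Spec_points_to_star (points : List (Int × Int)) (out : List String) : Prop := out = points_to_star_alt points
instance (points : List (Int × Int)) (out : List String) : Decidable (Spec_points_to_star points out) := by unfold Spec_points_to_star; infer_instance

-- ===== CLAIM (what is proved, stated in full; the proofs are below) =====
def Claim_equal_points_to_star : Prop := ∀ (points : List (Int × Int)), Dom_points_to_star points → Pre_points_to_star points → Spec_points_to_star points (points_to_star points)

-- ===== LEMMAS AND PROOFS =====

-- the key value of the first extremal element equals the extremum of the mapped list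
theorem key_min_eq (points : List (Int × Int)) (h : points ≠ []) (f : Int × Int → Int) :
    f ((PySem.List.min? points f).getD (0, 0))
      = (PySem.List.min? (points.map f) (fun v => v)).getD 0 := by
  obtain ⟨a, ha⟩ : ∃ a, PySem.List.min? points f = some a := by
    cases hm : PySem.List.min? points f with
    | none => exact absurd ((PySem.List.min?_eq_none_iff _ _).1 hm) h
    | some a => exact ⟨a, rfl⟩
  obtain ⟨v, hv⟩ : ∃ v, PySem.List.min? (points.map f) (fun v => v) = some v := by
    cases hm : PySem.List.min? (points.map f) (fun v => v) with
    | none =>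
      exact absurd (List.map_eq_nil_iff.1 ((PySem.List.min?_eq_none_iff _ _).1 hm)) h
    | some v => exact ⟨v, rfl⟩
  rw [ha, hv]
  simp only [Option.getD_some]
  obtain ⟨q, hq, rfl⟩ := List.mem_map.1 (PySem.List.min?_mem hv)
  exact le_antisymm (PySem.List.min?_isMin ha q hq)
    (PySem.List.min?_isMin hv (f a) (List.mem_map_of_mem (PySem.List.min?_mem ha)))

theorem key_max_eq (points : List (Int × Int)) (h : points ≠ []) (f : Int × Int → Int) :
    f ((PySem.List.max? points f).getD (0, 0))
      = (PySem.List.max? (points.map f) (fun v => v)).getD 0 := by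
  obtain ⟨a, ha⟩ : ∃ a, PySem.List.max? points f = some a := by
    cases hm : PySem.List.max? points f with
    | none => exact absurd ((PySem.List.max?_eq_none_iff _ _).1 hm) h
    | some a => exact ⟨a, rfl⟩
  obtain ⟨v, hv⟩ : ∃ v, PySem.List.max? (points.map f) (fun v => v) = some v := by
    cases hm : PySem.List.max? (points.map f) (fun v => v) with
    | none =>
      exact absurd (List.map_eq_nil_iff.1 ((PySem.List.max?_eq_none_iff _ _).1 hm)) h
    | some v => exact ⟨v, rfl⟩
  rw [ha, hv]
  simp only [Option.getD_some]
  obtain ⟨q, hq, rfl⟩ := List.mem_map.1 (PySem.List.max?_mem hv)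
  exact le_antisymm (PySem.List.max?_isMax hv (f a) (List.mem_map_of_mem (PySem.List.max?_mem ha)))
    (PySem.List.max?_isMax ha q hq)

-- the cell of a board (out-of-range reads give "")
def cellOf (b : List (List String)) (r c : Nat) : String := ((b.getD r []).getD c "")

theorem length_pySetCell (b : List (List String)) (i j : Int) (v : String) :
    (pySetCell b i j v).length = b.length := by
  simp [pySetCell]

theorem rowlen_pySetCell (b : List (List String)) (i j : Int) (v : String) (W : Nat)
    (hW : ∀ row ∈ b, row.length = W) :
    ∀ row ∈ pySetCell b i j v, row.length = W := by
  intro row hrow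
  simp only [pySetCell] at hrow
  rw [List.mem_iff_getElem] at hrow
  obtain ⟨k, hk, hkeq⟩ := hrow
  rw [List.length_modify] at hk
  rw [List.getElem_modify] at hkeq
  have hb := hW _ (List.getElem_mem hk)
  subst hkeq
  split_ifs <;> simp [pySetRow, hb]

theorem cell_pySetCell (b : List (List String)) (i j : Int) (hi : 0 ≤ i) (hj : 0 ≤ j)
    (hi' : i.toNat < b.length) (hj' : ∀ row ∈ b, j.toNat < row.length) (r c : Nat) :
    cellOf (pySetCell b i j "*") r c
      = if i.toNat = r ∧ j.toNat = c then "*" else cellOf b r c := by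
  have hni : ¬ i < 0 := not_lt.2 hi
  have hnj : ¬ j < 0 := not_lt.2 hj
  simp only [pySetCell, pySetRow, hni, hnj, if_false, cellOf,
    List.getD_eq_getElem?_getD, List.getElem?_modify]
  rcases eq_or_ne i.toNat r with hr | hr
  · subst hr
    rw [List.getElem?_eq_getElem hi']
    have hrow : j.toNat < (b[i.toNat]).length := hj' _ (List.getElem_mem hi')
    rcases eq_or_ne j.toNat c with hc | hc
    · subst hc
      simp [List.getElem?_set_self hrow]
    · simp [List.getElem?_set_ne hc, hc]
  · have hmap : ((fun a => if i.toNat = r then a.set j.toNat "*" else a) <$> b[r]?) = b[r]? := by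
      cases h : b[r]? <;> simp [hr]
    rw [hmap]
    simp [hr]

theorem cell_foldl (pts : List (Int × Int)) (b : List (List String)) (W : Nat)
    (rowOf colOf : Int × Int → Int)
    (hW : ∀ row ∈ b, row.length = W)
    (hp : ∀ p ∈ pts, 0 ≤ rowOf p ∧ (rowOf p).toNat < b.length ∧ 0 ≤ colOf p ∧ (colOf p).toNat < W)
    (r c : Nat) :
    cellOf (pts.foldl (fun bd p => pySetCell bd (rowOf p) (colOf p) "*") b) r c
      = if ∃ p ∈ pts, (rowOf p).toNat = r ∧ (colOf p).toNat = c then "*" else cellOf b r c := by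
  induction pts generalizing b with
  | nil => simp
  | cons p rest ih =>
    simp only [List.foldl_cons]
    obtain ⟨h1, h2, h3, h4⟩ := hp p (List.mem_cons_self ..)
    rw [ih (pySetCell b (rowOf p) (colOf p) "*")
        (rowlen_pySetCell _ _ _ _ _ hW)
        (fun q hq => by
          obtain ⟨a1, a2, a3, a4⟩ := hp q (List.mem_cons_of_mem _ hq)
          exact ⟨a1, by rwa [length_pySetCell], a3, a4⟩)]
    rw [cell_pySetCell b _ _ h1 h3 h2 (fun row hrow => by rw [hW row hrow]; exact h4)]
    simp only [List.exists_mem_cons_iff]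
    by_cases hA : ∃ q ∈ rest, (rowOf q).toNat = r ∧ (colOf q).toNat = c
    · simp [hA]
    · by_cases hB : (rowOf p).toNat = r ∧ (colOf p).toNat = c
      · simp [hA, hB]
      · simp [hA, hB]

theorem fst_min_eq (points : List (Int × Int)) (h : points ≠ []) :
    ((PySem.List.min? points (fun x => x.1)).getD (0, 0)).1
      = (PySem.List.min? (points.map (fun p => p.1)) (fun v => v)).getD 0 :=
  key_min_eq points h _

theorem fst_max_eq (points : List (Int × Int)) (h : points ≠ []) :
    ((PySem.List.max? points (fun x => x.1)).getD (0, 0)).1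
      = (PySem.List.max? (points.map (fun p => p.1)) (fun v => v)).getD 0 :=
  key_max_eq points h _

theorem snd_min_eq (points : List (Int × Int)) (h : points ≠ []) :
    ((PySem.List.min? points (fun x => x.2)).getD (0, 0)).2
      = (PySem.List.min? (points.map (fun p => p.2)) (fun v => v)).getD 0 :=
  key_min_eq points h _

theorem snd_max_eq (points : List (Int × Int)) (h : points ≠ []) :
    ((PySem.List.max? points (fun x => x.2)).getD (0, 0)).2
      = (PySem.List.max? (points.map (fun p => p.2)) (fun v => v)).getD 0 :=
  key_max_eq points h _

theorem minD_le (xs : List Int) (h : xs ≠ []) :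
    ∀ y ∈ xs, (PySem.List.min? xs (fun v => v)).getD 0 ≤ y := by
  intro y hy
  cases hm : PySem.List.min? xs (fun v => v) with
  | none => exact absurd ((PySem.List.min?_eq_none_iff _ _).1 hm) h
  | some v => simpa using PySem.List.min?_isMin hm y hy

theorem le_maxD (xs : List Int) (h : xs ≠ []) :
    ∀ y ∈ xs, y ≤ (PySem.List.max? xs (fun v => v)).getD 0 := by
  intro y hy
  cases hm : PySem.List.max? xs (fun v => v) with
  | none => exact absurd ((PySem.List.max?_eq_none_iff _ _).1 hm) h
  | some v => simpa using PySem.List.max?_isMax hm y hy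

theorem length_foldl_set (pts : List (Int × Int)) (b : List (List String))
    (rowOf colOf : Int × Int → Int) :
    (pts.foldl (fun bd p => pySetCell bd (rowOf p) (colOf p) "*") b).length = b.length := by
  induction pts generalizing b with
  | nil => rfl
  | cons p rest ih => rw [List.foldl_cons, ih, length_pySetCell]

theorem rowlen_foldl_set (pts : List (Int × Int)) (b : List (List String)) (W : Nat)
    (rowOf colOf : Int × Int → Int) (hW : ∀ row ∈ b, row.length = W) :
    ∀ row ∈ pts.foldl (fun bd p => pySetCell bd (rowOf p) (colOf p) "*") b, row.length = W := by
  induction pts generalizing b with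
  | nil => exact hW
  | cons p rest ih => exact ih _ (rowlen_pySetCell _ _ _ _ _ hW)

theorem getElem_eq_cellOf (b : List (List String)) (r c : Nat)
    (h1 : r < b.length) (h2 : c < (b[r]).length) : b[r][c] = cellOf b r c := by
  simp [cellOf, List.getD_eq_getElem?_getD, h1, h2]

-- join with an empty separator is flatten
theorem join_empty_toList (l : List String) :
    (PySem.Str.join "" l).toList = (l.map String.toList).flatten := by
  rw [PySem.Str.toList_join]
  show PySem.Chars.join [] _ = _
  generalize l.map String.toList = m
  induction m with
  | nil => simp [PySem.Chars.join_nil]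
  | cons a t ih =>
    cases t with
    | nil => simp [PySem.Chars.join_singleton]
    | cons b t2 =>
      rw [PySem.Chars.join_cons_cons]
      simp_all

-- membership in the grouping dict built by the setdefault/add loop
theorem mem_group (rowOf colOf : Int × Int → Int) (pts : List (Int × Int))
    (d : PySem.Dict Int (PySem.Set Int)) (k v : Int) :
    (v ∈ (pts.foldl (fun d p =>
        PySem.Dict.modify d (rowOf p) PySem.Set.empty
          (fun s => PySem.Set.add s (colOf p))) d).getD k PySem.Set.empty)
      ↔ v ∈ d.getD k PySem.Set.empty ∨ ∃ p ∈ pts, rowOf p = k ∧ colOf p = v := by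
  induction pts generalizing d with
  | nil => simp
  | cons p rest ih =>
    rw [List.foldl_cons, ih]
    rcases eq_or_ne k (rowOf p) with hk | hk
    · subst hk
      rw [PySem.Dict.getD_modify_self, PySem.Set.mem_add]
      simp only [List.exists_mem_cons_iff]
      tauto
    · rw [PySem.Dict.getD_modify_of_ne _ _ _ hk]
      simp only [List.exists_mem_cons_iff]
      constructor
      · rintro (h | h)
        · exact Or.inl h
        · exact Or.inr (Or.inr h)
      · rintro (h | ⟨h1, _⟩ | h)
        · exact Or.inl h
        · exact absurd h1.symm hk
        · exact Or.inr h

-- every set stored in the grouping dict is duplicate-free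
theorem nodup_group (rowOf colOf : Int × Int → Int) (pts : List (Int × Int))
    (d : PySem.Dict Int (PySem.Set Int))
    (h : ∀ k, (d.getD k PySem.Set.empty : List Int).Nodup) :
    ∀ k, ((pts.foldl (fun d p =>
        PySem.Dict.modify d (rowOf p) PySem.Set.empty
          (fun s => PySem.Set.add s (colOf p))) d).getD k PySem.Set.empty : List Int).Nodup := by
  induction pts generalizing d with
  | nil => exact h
  | cons p rest ih =>
    rw [List.foldl_cons]
    refine ih _ (fun k => ?_)
    rcases eq_or_ne k (rowOf p) with hk | hk
    · subst hk
      rw [PySem.Dict.getD_modify_self]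
      exact PySem.Set.nodup_add _ _ (h _)
    · rw [PySem.Dict.getD_modify_of_ne _ _ _ hk]
      exact h _

-- the chars of one '.'-run, a star, and the tail of the row
theorem run_split (c prev w : Int) (rest : List Int)
    (hc : prev ≤ c) (hcw : c < w) (hrest : ∀ x ∈ rest, c < x) :
    List.replicate (c - prev).toNat '.'
        ++ '*' :: (List.range (w - (c + 1)).toNat).map
              (fun (i : Nat) => if ((c + 1) + (i : Int)) ∈ rest then '*' else '.')
      = (List.range (w - prev).toNat).map
          (fun (i : Nat) => if (prev + (i : Int)) ∈ (c :: rest) then '*' else '.') := by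
  apply List.ext_getElem
  · simp
    omega
  · intro i h1 h2
    rw [List.getElem_map, List.getElem_range]
    rcases lt_trichotomy i (c - prev).toNat with hi | hi | hi
    · rw [List.getElem_append_left (by simpa using hi)]
      rw [List.getElem_replicate]
      have hne : prev + (i : Int) ≠ c := by omega
      have hnm : prev + (i : Int) ∉ rest := fun hm => by have := hrest _ hm; omega
      simp [hne, hnm]
    · subst hi
      rw [List.getElem_append_right (by simp)]
      simp only [List.length_replicate, Nat.sub_self, List.getElem_cons_zero]
      have hc' : prev + ((c - prev).toNat : Int) = c := by omega
      rw [hc']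
      simp
    · have h2' : i < (w - prev).toNat := by simpa using h2
      rw [List.getElem_append_right (by simp; omega)]
      simp only [List.length_replicate]
      rw [List.getElem_cons]
      rw [dif_neg (by omega)]
      rw [List.getElem_map, List.getElem_range]
      have hidx : (c + 1) + ((i - (c - prev).toNat - 1 : Nat) : Int) = prev + (i : Int) := by
        omega
      rw [hidx]
      have hne : prev + (i : Int) ≠ c := by omega
      simp [hne]

-- the run-building loop of B produces exactly the row of the star/blank grid
theorem run_chars (cols : List Int) (w : Int) :
    ∀ (prev : Int) (acc : List String),
    cols.Pairwise (· < ·) →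
    (∀ c ∈ cols, prev ≤ c ∧ c < w) →
    (PySem.Str.join "" ((cols.foldl
        (fun (st : List String × Int) c => (st.1 ++ [dots (c - st.2), "*"], c + 1)) (acc, prev)).1
      ++ [dots (w - (cols.foldl
        (fun (st : List String × Int) c => (st.1 ++ [dots (c - st.2), "*"], c + 1)) (acc, prev)).2)])).toList
      = (PySem.Str.join "" acc).toList
        ++ (List.range (w - prev).toNat).map (fun (i : Nat) => if (prev + (i : Int)) ∈ cols then '*' else '.') := by
  induction cols with
  | nil =>
    intro prev acc _ _
    rw [List.foldl_nil, join_empty_toList, List.map_append, List.flatten_append,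
      ← join_empty_toList]
    simp [dots]
  | cons c rest ih =>
    intro prev acc hs hb
    rw [List.foldl_cons]
    have hbc := hb c (List.mem_cons_self ..)
    have hrest : ∀ x ∈ rest, c < x := fun x hx => (List.pairwise_cons.1 hs).1 x hx
    rw [ih (c + 1) (acc ++ [dots (c - prev), "*"]) (List.pairwise_cons.1 hs).2
        (fun x hx => ⟨by have := hrest x hx; omega, (hb x (List.mem_cons_of_mem _ hx)).2⟩)]
    rw [join_empty_toList, List.map_append, List.flatten_append]
    rw [← join_empty_toList, List.append_assoc]
    congr 1
    have hdots : ([dots (c - prev), "*"].map String.toList).flatten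
        = List.replicate (c - prev).toNat '.' ++ ['*'] := by
      simp [dots]
    rw [hdots, List.append_assoc]
    show _ ++ ('*' :: _) = _
    exact run_split c prev w rest hbc.1 hbc.2 hrest

-- the joined chars of a row of one-char cells
theorem flatten_cells (l : List Nat) (P : Nat → Prop) [DecidablePred P] :
    ((l.map (fun c => if P c then "*" else ".")).map String.toList).flatten
      = l.map (fun c => if P c then '*' else '.') := by
  induction l with
  | nil => rfl
  | cons c t ih =>
    simp only [List.map_cons, List.flatten_cons, ih]
    by_cases h : P c <;> simp [h]

-- strings with the same chars are equal
theorem str_ext (a b : String) (h : a.toList = b.toList) : a = b := by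
  have h' := congrArg String.ofList h
  rwa [String.ofList_toList, String.ofList_toList] at h'

-- ===== VERDICT (by name: the statement is the Claim_ definition above) =====
theorem points_to_star_spec : Claim_equal_points_to_star := by
  unfold Claim_equal_points_to_star
  intro points _ hpre
  unfold Pre_points_to_star at hpre
  unfold Spec_points_to_star
  simp only [points_to_star, points_to_star_alt,
    fst_min_eq points hpre, fst_max_eq points hpre,
    snd_min_eq points hpre, snd_max_eq points hpre]
  set mx := (PySem.List.min? (points.map (fun p => p.1)) (fun v => v)).getD 0 with hmx
  set Mx := (PySem.List.max? (points.map (fun p => p.1)) (fun v => v)).getD 0 with hMx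
  set my := (PySem.List.min? (points.map (fun p => p.2)) (fun v => v)).getD 0 with hmy
  set My := (PySem.List.max? (points.map (fun p => p.2)) (fun v => v)).getD 0 with hMy
  have hxsne : points.map (fun p => p.1) ≠ [] := by simpa using hpre
  have hysne : points.map (fun p => p.2) ≠ [] := by simpa using hpre
  have hbounds : ∀ p ∈ points, mx ≤ p.1 ∧ p.1 ≤ Mx ∧ my ≤ p.2 ∧ p.2 ≤ My := by
    intro p hp
    exact ⟨minD_le _ hxsne _ (List.mem_map_of_mem hp),
           le_maxD _ hxsne _ (List.mem_map_of_mem hp),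
           minD_le _ hysne _ (List.mem_map_of_mem hp),
           le_maxD _ hysne _ (List.mem_map_of_mem hp)⟩
  obtain ⟨q, hq⟩ := List.exists_mem_of_ne_nil points hpre
  have hxx : mx ≤ Mx := le_trans (hbounds q hq).1 (hbounds q hq).2.1
  have hyy : my ≤ My := le_trans (hbounds q hq).2.2.1 (hbounds q hq).2.2.2
  have habs : ∀ p ∈ points, |p.2 - My| = My - p.2 := by
    intro p hp
    rw [abs_of_nonpos (by have := (hbounds p hp).2.2.2; omega)]
    ring
  set W : Nat := (Mx - mx + 1).toNat with hW
  set binit : List (List String) :=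
    (PySem.List.pyRange my (My + 1) 1).map (fun _ => List.replicate W ".") with hbinit
  have hbl : binit.length = (My + 1 - my).toNat := by
    rw [hbinit, List.length_map, PySem.List.length_pyRange_one]
  have hbrows : ∀ row ∈ binit, row.length = W := by
    intro row hrow
    obtain ⟨_, _, rfl⟩ := List.mem_map.1 hrow
    exact List.length_replicate
  have hp : ∀ p ∈ points,
      0 ≤ |p.2 - My| ∧ (|p.2 - My|).toNat < binit.length ∧
      0 ≤ p.1 - mx ∧ (p.1 - mx).toNat < W := by
    intro p hp
    obtain ⟨b1, b2, b3, b4⟩ := hbounds p hp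
    refine ⟨abs_nonneg _, ?_, by omega, by omega⟩
    rw [habs p hp, hbl]
    omega
  set bfin := points.foldl (fun bd p => pySetCell bd |p.2 - My| (p.1 - mx) "*") binit with hbfin
  have hfl : bfin.length = binit.length :=
    length_foldl_set points binit (fun p => |p.2 - My|) (fun p => p.1 - mx)
  have hfrows : ∀ row ∈ bfin, row.length = W :=
    rowlen_foldl_set points binit W (fun p => |p.2 - My|) (fun p => p.1 - mx) hbrows
  apply List.ext_getElem
  · simp only [List.length_map, hfl, hbl, PySem.List.length_pyRange_one]
    omega
  · intro r hr1 hr2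
    rw [List.getElem_map, List.getElem_map, PySem.List.getElem_pyRange_one]
    simp only [zero_add]
    have hrb : r < bfin.length := by simpa using hr1
    have hrH : (r : Int) < My - my + 1 := by
      rw [List.length_map, PySem.List.length_pyRange_one] at hr2
      omega
    set colsSet := ((points.foldl (fun d p =>
        PySem.Dict.modify d (My - p.2) PySem.Set.empty
          (fun s => PySem.Set.add s (p.1 - mx))) PySem.Dict.empty).getD
        ((r : Int)) PySem.Set.empty) with hcolsSet
    set cols := PySem.List.sorted colsSet (fun v => v) false with hcols
    have hmemS : ∀ v : Int, v ∈ colsSet ↔ ∃ p ∈ points, My - p.2 = (r : Int) ∧ p.1 - mx = v := by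
      intro v
      rw [hcolsSet, mem_group]
      simp [PySem.Dict.getD_empty, PySem.Set.empty]
    have hmem : ∀ v : Int, v ∈ cols ↔ ∃ p ∈ points, My - p.2 = (r : Int) ∧ p.1 - mx = v := by
      intro v
      rw [hcols, PySem.List.mem_sorted]
      exact hmemS v
    have hnd : colsSet.Nodup := by
      rw [hcolsSet]
      exact nodup_group _ _ points PySem.Dict.empty
        (by intro k; simp [PySem.Dict.getD_empty, PySem.Set.empty]) _
    have hndc : cols.Nodup :=
      ((PySem.List.sorted_perm colsSet (fun v => v) false).nodup_iff).2 hnd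
    have hple : cols.Pairwise (· ≤ ·) := PySem.List.sorted_pairwise colsSet (fun v => v)
    have hplt : cols.Pairwise (· < ·) :=
      (List.Pairwise.and hple hndc).imp (fun h => lt_of_le_of_ne h.1 h.2)
    have hbnds : ∀ x ∈ cols, (0 : Int) ≤ x ∧ x < Mx - mx + 1 := by
      intro x hx
      obtain ⟨p, hpm, _, rfl⟩ := (hmem x).1 hx
      obtain ⟨b1, b2, _, _⟩ := hbounds p hpm
      omega
    have hrow : bfin[r] = (List.range W).map (fun (c : Nat) =>
        if (∃ p ∈ points, (|p.2 - My|).toNat = r ∧ (p.1 - mx).toNat = c) then "*" else ".") := by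
      apply List.ext_getElem
      · rw [hfrows _ (List.getElem_mem hrb)]
        simp
      · intro c h1 h2
        rw [List.getElem_map, List.getElem_range]
        have hcW : c < W := by rw [hfrows _ (List.getElem_mem hrb)] at h1; exact h1
        rw [getElem_eq_cellOf bfin r c hrb h1, hbfin,
          cell_foldl points binit W (fun p => |p.2 - My|) (fun p => p.1 - mx) hbrows hp r c]
        have hrb' : r < binit.length := by rw [← hfl]; exact hrb
        have hget : binit[r]'hrb' = List.replicate W "." := List.getElem_map _
        have hinit : cellOf binit r c = "." := by
          rw [← getElem_eq_cellOf binit r c hrb'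
            (by rw [hbrows _ (List.getElem_mem hrb')]; exact hcW)]
          simp [hget]
        rw [hinit]
    apply str_ext
    rw [hrow, join_empty_toList, flatten_cells,
      run_chars cols (Mx - mx + 1) 0 [] hplt (fun x hx => (hbnds x hx))]
    simp only [join_empty_toList, List.map_nil, List.flatten_nil, List.nil_append, Int.sub_zero]
    have hWw : (Mx - mx + 1).toNat = W := rfl
    rw [hWw]
    apply List.map_congr_left
    intro i hi
    rw [List.mem_range] at hi
    refine if_congr ?_ rfl rfl
    rw [hmem ((0 : Int) + (i : Int))]
    constructor
    · rintro ⟨p, hpm, e1, e2⟩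
      obtain ⟨b1, b2, b3, b4⟩ := hbounds p hpm
      rw [habs p hpm] at e1
      exact ⟨p, hpm, by omega, by omega⟩
    · rintro ⟨p, hpm, e1, e2⟩
      obtain ⟨b1, b2, b3, b4⟩ := hbounds p hpm
      refine ⟨p, hpm, ?_, ?_⟩
      · rw [habs p hpm]
        omega
      · omega
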